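-- pv_equiv track=rewrite | github.com/angelammaribeiro/Exhaustive-Search-Algorithm | exhaustive_search.py | is_valid_matching
-- ===== SOURCE A (Python) =====
-- def is_valid_matching(edges):
--     """
--     Check if a set of edges forms a valid matching.
--     A matching is valid if no two edges share a common vertex.
--
--     Args:
--         edges: List of edges, where each edge is a tuple (u, v, weight)
--
--     Returns:
--         True if the edges form a valid matching, False otherwise
--     """
--     vertices_used = set()
--     for u, v, _ in edges:
--         if u in vertices_used or v in vertices_used:
--             return False
--         vertices_used.add(u)
--         vertices_used.add(v)
--     return True
-- ===== SOURCE B (Python) =====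
-- def is_valid_matching(edges):
--     sum_distinct = 0
--     all_vertices = set()
--     for u, v, _ in edges:
--         sum_distinct += len({u, v})
--         all_vertices |= {u, v}
--     return sum_distinct == len(all_vertices)
-- ===== Notes on version B (the rewrite author's own statement) =====
-- stated objective: alternative
-- what changed: A's incremental early-exit membership loop over a growing used-vertex set is replaced by a single aggregate pass that sums per-edge distinct-endpoint counts and compares the sum with the size of the union of all endpoints.
import Mathlib
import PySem

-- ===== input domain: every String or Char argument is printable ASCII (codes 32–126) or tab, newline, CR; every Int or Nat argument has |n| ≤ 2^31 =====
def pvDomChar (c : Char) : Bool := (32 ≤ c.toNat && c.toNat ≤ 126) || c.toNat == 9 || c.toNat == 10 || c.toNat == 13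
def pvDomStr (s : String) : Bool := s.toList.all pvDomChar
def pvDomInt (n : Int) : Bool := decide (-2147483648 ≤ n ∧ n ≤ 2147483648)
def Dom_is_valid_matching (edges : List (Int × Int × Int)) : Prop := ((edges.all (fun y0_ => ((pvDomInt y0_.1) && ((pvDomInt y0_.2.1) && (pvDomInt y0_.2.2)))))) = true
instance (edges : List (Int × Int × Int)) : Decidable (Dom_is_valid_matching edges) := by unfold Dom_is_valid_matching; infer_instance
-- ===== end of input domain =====

-- B replaces A's incremental early-exit membership loop with an aggregate comparison:
-- sum of per-edge distinct-endpoint counts vs size of the union of all endpoints (objective: alternative).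


-- ===== PORT A =====
-- loop 'for u, v, _ in edges' with early 'return False', carrying vertices_used : set
def isvmLoopA (used : PySem.Set Int) : List (Int × Int × Int) → Bool
  | [] => true
  | (u, v, _) :: rest =>
    if PySem.Set.contains used u || PySem.Set.contains used v then false
    else isvmLoopA (PySem.Set.add (PySem.Set.add used u) v) rest

def is_valid_matching (edges : List (Int × Int × Int)) : Bool :=
  isvmLoopA PySem.Set.empty edges

-- ===== PORT B =====
-- one fold accumulating (sum_distinct, all_vertices); final comparison sum_distinct == len(all_vertices)
def is_valid_matching_alt (edges : List (Int × Int × Int)) : Bool :=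
  let st := edges.foldl
    (fun (p : Int × PySem.Set Int) e =>
      (p.1 + ((PySem.Set.ofList [e.1, e.2.1]).length : Int),
       PySem.Set.update p.2 [e.1, e.2.1]))
    ((0 : Int), PySem.Set.empty)
  decide (st.1 = (st.2.length : Int))

-- ===== PRECONDITION & SPEC =====
def Spec_is_valid_matching (edges : List (Int × Int × Int)) (out : Bool) : Prop := out = is_valid_matching_alt edges
instance (edges : List (Int × Int × Int)) (out : Bool) : Decidable (Spec_is_valid_matching edges out) := by unfold Spec_is_valid_matching; infer_instance

-- ===== CLAIM (what is proved, stated in full; the proofs are below) =====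
def Claim_equal_is_valid_matching : Prop := ∀ (edges : List (Int × Int × Int)), Dom_is_valid_matching edges → Spec_is_valid_matching edges (is_valid_matching edges)

-- ===== LEMMAS AND PROOFS =====

-- sum of per-edge distinct-endpoint counts
def isvmSumD (edges : List (Int × Int × Int)) : Int :=
  (edges.map (fun e => ((PySem.Set.ofList [e.1, e.2.1]).length : Int))).sum

-- union of endpoints accumulated from s
def isvmUnion (s : PySem.Set Int) (edges : List (Int × Int × Int)) : PySem.Set Int :=
  edges.foldl (fun t e => PySem.Set.update t [e.1, e.2.1]) s

lemma isvm_fold_split (edges : List (Int × Int × Int)) :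
    ∀ (c : Int) (s : PySem.Set Int),
    edges.foldl
      (fun (p : Int × PySem.Set Int) e =>
        (p.1 + ((PySem.Set.ofList [e.1, e.2.1]).length : Int),
         PySem.Set.update p.2 [e.1, e.2.1])) (c, s)
      = (c + isvmSumD edges, isvmUnion s edges) := by
  induction edges with
  | nil => intro c s; simp [isvmSumD, isvmUnion]
  | cons e rest ih =>
      intro c s
      simp only [List.foldl_cons, ih, isvmSumD, isvmUnion, List.map_cons, List.sum_cons,
        List.foldl_cons]
      simp [add_assoc]

lemma isvm_union_length_le (edges : List (Int × Int × Int)) :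
    ∀ (s : PySem.Set Int),
    ((isvmUnion s edges).length : Int) ≤ (s.length : Int) + isvmSumD edges := by
  induction edges with
  | nil => intro s; simp [isvmSumD, isvmUnion]
  | cons e rest ih =>
      intro s
      have h1 : (PySem.Set.update s [e.1, e.2.1]).length
          ≤ s.length + (PySem.Set.ofList [e.1, e.2.1]).length := by
        rw [PySem.Set.update_eq_append_filter]
        simp only [List.length_append]
        have := List.length_filter_le (fun y => !(PySem.Set.contains s y)) (PySem.Set.ofList [e.1, e.2.1])
        omega
      have h2 := ih (PySem.Set.update s [e.1, e.2.1])
      simp only [isvmUnion, List.foldl_cons] at *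
      simp only [isvmSumD, List.map_cons, List.sum_cons] at *
      omega

-- main invariant: A's loop from state s decides "count sum + |s| = |union from s|"
lemma isvm_key (edges : List (Int × Int × Int)) :
    ∀ (s : PySem.Set Int), s.Nodup →
    isvmLoopA s edges
      = decide (isvmSumD edges + (s.length : Int) = ((isvmUnion s edges).length : Int)) := by
  induction edges with
  | nil =>
      intro s _
      simp [isvmLoopA, isvmSumD, isvmUnion]
  | cons e rest ih =>
      intro s hs
      obtain ⟨u, v, w⟩ := e
      have hupd : PySem.Set.update s [u, v] = PySem.Set.add (PySem.Set.add s u) v := rfl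
      by_cases hmem : u ∈ s ∨ v ∈ s
      · -- A returns False; show the aggregate equality fails
        have hcontains : (PySem.Set.contains s u || PySem.Set.contains s v) = true := by
          simp only [Bool.or_eq_true, PySem.Set.contains_eq_listContains,
            List.contains_iff_mem]
          exact hmem
        have hstrict : (PySem.Set.update s [u, v]).length
            < s.length + (PySem.Set.ofList [u, v]).length := by
          rw [PySem.Set.update_eq_append_filter]
          simp only [List.length_append]
          have hlt : ((PySem.Set.ofList [u, v]).filter
              (fun y => !(PySem.Set.contains s y))).length < (PySem.Set.ofList [u, v]).length := by
            rw [List.length_filter_lt_length_iff_exists]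
            rcases hmem with h | h
            · exact ⟨u, by simp [PySem.Set.mem_ofList], by simp; exact h⟩
            · exact ⟨v, by simp [PySem.Set.mem_ofList], by simp; exact h⟩
          omega
        have hle := isvm_union_length_le rest (PySem.Set.update s [u, v])
        have hne : ¬ (isvmSumD ((u, v, w) :: rest) + (s.length : Int)
            = ((isvmUnion s ((u, v, w) :: rest)).length : Int)) := by
          simp only [isvmSumD, List.map_cons, List.sum_cons] at *
          simp only [isvmUnion, List.foldl_cons] at *
          omega
        simp only [isvmLoopA, hcontains, if_true]
        simp [hne]
      · -- both endpoints fresh: step and apply the IH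
        push Not at hmem
        have hcontains : (PySem.Set.contains s u || PySem.Set.contains s v) = false := by
          simp [hmem.1, hmem.2]
        have hkeep : (PySem.Set.update s [u, v]).length
            = s.length + (PySem.Set.ofList [u, v]).length := by
          rw [PySem.Set.update_eq_append_filter]
          simp only [List.length_append]
          have : ((PySem.Set.ofList [u, v]).filter
              (fun y => !(PySem.Set.contains s y))) = PySem.Set.ofList [u, v] := by
            apply List.filter_eq_self.mpr
            intro a ha
            rw [PySem.Set.mem_ofList] at ha
            simp only [List.mem_cons, List.not_mem_nil, or_false] at ha
            rcases ha with rfl | rfl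
            · simp; exact hmem.1
            · simp; exact hmem.2
          rw [this]
        have hnodup : (PySem.Set.update s [u, v]).Nodup := PySem.Set.nodup_update s [u, v] hs
        have ihres := ih (PySem.Set.update s [u, v]) hnodup
        simp only [isvmLoopA, hcontains, Bool.false_eq_true, if_false, ← hupd, ihres]
        have harith : isvmSumD rest + ((PySem.Set.update s [u, v]).length : Int)
            = isvmSumD ((u, v, w) :: rest) + (s.length : Int) := by
          simp only [isvmSumD, List.map_cons, List.sum_cons, hkeep]
          push_cast
          ring
        rw [harith]
        simp only [isvmUnion, List.foldl_cons]
        rfl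

-- ===== VERDICT (by name: the statement is the Claim_ definition above) =====
theorem is_valid_matching_spec : Claim_equal_is_valid_matching := by
  intro edges _
  unfold Spec_is_valid_matching is_valid_matching is_valid_matching_alt
  rw [isvm_fold_split]
  rw [isvm_key edges PySem.Set.empty (by simp [PySem.Set.empty])]
  simp [PySem.Set.empty, isvmUnion]
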